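-- pv_equiv track=rewrite | github.com/Uks130322/yandex_algs_6.0 | algs_6_2/task_D.py | things_to_do
-- ===== SOURCE A (Python) =====
-- def things_to_do(quantity: int, diversity: int, things: list[int]) -> list[int]:
--     things = sorted(things)
--     first = 0
--     second = 0
--     days = 1
--
--     while second < quantity:
--         if things[second] - things[first] <= diversity:
--             second += 1
--             if second >= quantity:
--                 if second - first > days:
--                     days = second - first
--         else:
--             if second - first > days:
--                 days = second - first
--             first += 1
--             second += 1
--
--     return days
-- ===== SOURCE B (Python) =====
-- def things_to_do(quantity: int, diversity: int, things: list[int]) -> int: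
--     s = sorted(things)
--     days = 1
--     for i in range(quantity):
--         limit = s[i] + diversity
--         lo, hi = i, quantity
--         while lo < hi:
--             mid = (lo + hi) // 2
--             if s[mid] <= limit:
--                 lo = mid + 1
--             else:
--                 hi = mid
--         if lo - i > days:
--             days = lo - i
--     return days
-- ===== Notes on version B (the rewrite author's own statement) =====
-- stated objective: alternative
-- what changed: Replaces A's two-pointer non-shrinking window sweep over the sorted list by an independent per-start-index binary search (hand-written bisect_right over s[i:quantity]) taking the maximum of the found window lengths.
import Mathlib
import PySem

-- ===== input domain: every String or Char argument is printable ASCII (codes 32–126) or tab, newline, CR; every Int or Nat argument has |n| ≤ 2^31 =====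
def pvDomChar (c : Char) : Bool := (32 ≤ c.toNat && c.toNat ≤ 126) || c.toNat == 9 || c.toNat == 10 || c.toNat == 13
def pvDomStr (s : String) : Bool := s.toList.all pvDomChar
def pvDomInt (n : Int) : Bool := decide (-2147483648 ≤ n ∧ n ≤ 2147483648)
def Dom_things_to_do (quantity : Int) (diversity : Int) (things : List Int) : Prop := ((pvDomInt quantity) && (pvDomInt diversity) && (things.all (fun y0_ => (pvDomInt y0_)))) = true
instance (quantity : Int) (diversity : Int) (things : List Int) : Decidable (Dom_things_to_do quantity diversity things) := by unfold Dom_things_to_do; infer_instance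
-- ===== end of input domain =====

-- B replaces A's two-pointer sweep by a per-start-index binary search over the sorted
-- list (alternative algorithm, same asymptotic cost); return values agree on Pre_.

-- ===== PORT A =====
-- the while-loop of A, state (first, second, days); on an out-of-range index Python
-- raises IndexError (excluded by Pre_), the port returns 0 there.
def things_to_do_loopA (s : List Int) (q d : Int) (first second days : Int) : Int :=
  if _h : second < q then
    match PySem.List.pyGet? s second, PySem.List.pyGet? s first with
    | some a, some b =>
      if a - b ≤ d then
        things_to_do_loopA s q d first (second + 1)
          (if second + 1 ≥ q ∧ second + 1 - first > days then second + 1 - first else days)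
      else
        things_to_do_loopA s q d (first + 1) (second + 1)
          (if second - first > days then second - first else days)
    | _, _ => 0
  else days
termination_by (q - second).toNat
decreasing_by all_goals omega

def things_to_do (quantity : Int) (diversity : Int) (things : List Int) : Int :=
  things_to_do_loopA (PySem.List.sorted things (fun x => x) false) quantity diversity 0 0 1

-- ===== PORT B =====
-- hand-written bisect_right from Source B: while lo < hi: mid = (lo+hi)//2; …
def things_to_do_bsearch (s : List Int) (limit lo hi : Int) : Int :=
  if _h : lo < hi then
    match PySem.List.pyGet? s (PySem.Int.floordiv (lo + hi) 2) with
    | some v =>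
      if v ≤ limit then things_to_do_bsearch s limit (PySem.Int.floordiv (lo + hi) 2 + 1) hi
      else things_to_do_bsearch s limit lo (PySem.Int.floordiv (lo + hi) 2)
    | none => 0
  else lo
termination_by (hi - lo).toNat
decreasing_by
  all_goals
    have h1 : lo ≤ PySem.Int.floordiv (lo + hi) 2 ∧ PySem.Int.floordiv (lo + hi) 2 ≤ hi :=
      PySem.Int.floordiv_two_mid_bounds (by omega)
    have h2 : PySem.Int.floordiv (lo + hi) 2 < hi :=
      (PySem.Int.floordiv_lt_iff_lt_mul (by omega)).mpr (by omega)
    omega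

def things_to_do_alt (quantity : Int) (diversity : Int) (things : List Int) : Int :=
  (PySem.List.pyRange 0 quantity 1).foldl
    (fun days i =>
      match PySem.List.pyGet? (PySem.List.sorted things (fun x => x) false) i with
      | some v =>
          if things_to_do_bsearch (PySem.List.sorted things (fun x => x) false) (v + diversity) i quantity - i > days
          then things_to_do_bsearch (PySem.List.sorted things (fun x => x) false) (v + diversity) i quantity - i
          else days
      | none => days) 1

-- ===== PRECONDITION & SPEC =====
-- A raises IndexError exactly when quantity > len(things) (the loop always drives
-- `second` up to quantity); Pre_ excludes exactly those inputs (B raises there too).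
def Pre_things_to_do (quantity : Int) (diversity : Int) (things : List Int) : Prop :=
  quantity ≤ (things.length : Int)
instance (quantity : Int) (diversity : Int) (things : List Int) : Decidable (Pre_things_to_do quantity diversity things) := by unfold Pre_things_to_do; infer_instance

def pvWitness_things_to_do : Int × Int × List Int := (2, 5, [1, 3, 10])

def Spec_things_to_do (quantity : Int) (diversity : Int) (things : List Int) (out : Int) : Prop := out = things_to_do_alt quantity diversity things
instance (quantity : Int) (diversity : Int) (things : List Int) (out : Int) : Decidable (Spec_things_to_do quantity diversity things out) := by unfold Spec_things_to_do; infer_instance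

-- ===== CLAIM (what is proved, stated in full; the proofs are below) =====
def Claim_equal_things_to_do : Prop := ∀ (quantity : Int) (diversity : Int) (things : List Int), Dom_things_to_do quantity diversity things → Pre_things_to_do quantity diversity things → Spec_things_to_do quantity diversity things (things_to_do quantity diversity things)

-- ===== LEMMAS AND PROOFS =====

-- total indexing used only in the proofs
def pvAt (s : List Int) (i : Int) : Int := PySem.List.pyGetD s i 0

-- the sorted list is monotone under pvAt
def pvMono (s : List Int) : Prop :=
  ∀ i j : Int, 0 ≤ i → i ≤ j → j < (s.length : Int) → pvAt s i ≤ pvAt s j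

-- longest feasible window starting at f, via the binary search (proof-side name)
def pvL (s : List Int) (q d f : Int) : Int :=
  things_to_do_bsearch s (pvAt s f + d) f q - f

-- maximum of pvL over [f, q) (proof-side)
def pvMfrom (s : List Int) (q d f : Int) : Int :=
  if _h : f < q then max (pvL s q d f) (pvMfrom s q d (f + 1)) else 0
termination_by (q - f).toNat
decreasing_by omega

-- A's future window size from state (first, second) (proof-side mirror of the sweep)
def pvWsim (s : List Int) (q d f c : Int) : Int :=
  if _h : c < q then
    if pvAt s c - pvAt s f ≤ d then pvWsim s q d f (c + 1) else pvWsim s q d (f + 1) (c + 1)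
  else c - f
termination_by (q - c).toNat
decreasing_by all_goals omega

theorem pvAt_pyGet? (s : List Int) (i : Int) (h0 : 0 ≤ i) (h1 : i < (s.length : Int)) :
    PySem.List.pyGet? s i = some (pvAt s i) := by
  rw [PySem.List.pyGet?_eq_some_getElem s h0 h1, pvAt,
    PySem.List.pyGetD_eq_getElem s 0 h0 h1]

theorem pvMono_sorted (things : List Int) :
    pvMono (PySem.List.sorted things (fun x => x) false) := by
  intro i j hi hij hj
  have hp := PySem.List.sorted_pairwise things (fun x => x)
  rw [List.pairwise_iff_getElem] at hp
  unfold pvAt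
  rw [PySem.List.pyGetD_eq_getElem _ 0 hi (by omega),
      PySem.List.pyGetD_eq_getElem _ 0 (by omega) hj]
  rcases eq_or_lt_of_le hij with h | h
  · subst h; exact le_refl _
  · exact hp i.toNat j.toNat (by omega) (by omega) (by omega)

-- characterisation of the binary search on a monotone list
theorem pv_bs_spec (s : List Int) (limit : Int) (hm : pvMono s) :
    ∀ (n : Nat) (lo hi : Int), (hi - lo).toNat ≤ n → 0 ≤ lo → lo ≤ hi → hi ≤ (s.length : Int) →
      lo ≤ things_to_do_bsearch s limit lo hi ∧
      things_to_do_bsearch s limit lo hi ≤ hi ∧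
      (∀ j, lo ≤ j → j < things_to_do_bsearch s limit lo hi → pvAt s j ≤ limit) ∧
      (∀ j, things_to_do_bsearch s limit lo hi ≤ j → j < hi → limit < pvAt s j) := by
  intro n
  induction n with
  | zero =>
    intro lo hi hn h0 hlh hhl
    have he : ¬ lo < hi := by omega
    rw [things_to_do_bsearch, dif_neg he]
    exact ⟨le_refl _, hlh, fun j h1 h2 => by omega, fun j h1 h2 => by omega⟩
  | succ n ih =>
    intro lo hi hn h0 hlh hhl
    by_cases h : lo < hi
    · have hb : lo ≤ PySem.Int.floordiv (lo + hi) 2 ∧ PySem.Int.floordiv (lo + hi) 2 ≤ hi :=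
        PySem.Int.floordiv_two_mid_bounds (by omega)
      have hlt : PySem.Int.floordiv (lo + hi) 2 < hi :=
        (PySem.Int.floordiv_lt_iff_lt_mul (by omega)).mpr (by omega)
      rw [things_to_do_bsearch, dif_pos h,
        pvAt_pyGet? s (PySem.Int.floordiv (lo + hi) 2) (by omega) (by omega)]
      by_cases hv : pvAt s (PySem.Int.floordiv (lo + hi) 2) ≤ limit
      · simp only [hv, if_true]
        obtain ⟨p1, p2, p3, p4⟩ := ih (PySem.Int.floordiv (lo + hi) 2 + 1) hi
          (by omega) (by omega) (by omega) hhl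
        refine ⟨by omega, p2, ?_, p4⟩
        intro j hj1 hj2
        by_cases hjm : j ≤ PySem.Int.floordiv (lo + hi) 2
        · exact le_trans (hm j (PySem.Int.floordiv (lo + hi) 2) (by omega) hjm (by omega)) hv
        · exact p3 j (by omega) hj2
      · simp only [hv, if_false]
        obtain ⟨p1, p2, p3, p4⟩ := ih lo (PySem.Int.floordiv (lo + hi) 2)
          (by omega) h0 (by omega) (by omega)
        refine ⟨p1, by omega, p3, ?_⟩
        intro j hj1 hj2
        by_cases hjm : PySem.Int.floordiv (lo + hi) 2 ≤ j
        · exact lt_of_not_ge fun hc => hv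
            (le_trans (hm (PySem.Int.floordiv (lo + hi) 2) j (by omega) hjm (by omega)) hc)
        · exact p4 j hj1 (by omega)
    · rw [things_to_do_bsearch, dif_neg h]
      exact ⟨le_refl _, hlh, fun j h1 h2 => by omega, fun j h1 h2 => by omega⟩

theorem pvL_bounds (s : List Int) (q d f : Int) (hm : pvMono s)
    (h0 : 0 ≤ f) (hfq : f ≤ q) (hq : q ≤ (s.length : Int)) :
    0 ≤ pvL s q d f ∧ pvL s q d f ≤ q - f := by
  obtain ⟨p1, p2, _, _⟩ := pv_bs_spec s (pvAt s f + d) hm (q - f).toNat f q (le_refl _) h0 hfq hq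
  unfold pvL; omega

theorem pvMfrom_le (s : List Int) (q d : Int) (hm : pvMono s) (hq : q ≤ (s.length : Int)) :
    ∀ (n : Nat) (f : Int), (q - f).toNat ≤ n → 0 ≤ f → f ≤ q → pvMfrom s q d f ≤ q - f := by
  intro n
  induction n with
  | zero =>
    intro f hn h0 hfq
    rw [pvMfrom, dif_neg (by omega : ¬ f < q)]; omega
  | succ n ih =>
    intro f hn h0 hfq
    by_cases h : f < q
    · rw [pvMfrom, dif_pos h]
      have h1 := pvL_bounds s q d f hm h0 hfq hq
      have h2 := ih (f + 1) (by omega) (by omega) (by omega)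
      omega
    · rw [pvMfrom, dif_neg h]; omega

theorem pvMfrom_nonneg (s : List Int) (q d f : Int) (hm : pvMono s)
    (h0 : 0 ≤ f) (hfq : f ≤ q) (hq : q ≤ (s.length : Int)) :
    0 ≤ pvMfrom s q d f := by
  by_cases h : f < q
  · rw [pvMfrom, dif_pos h]
    have h1 := pvL_bounds s q d f hm h0 hfq hq
    omega
  · rw [pvMfrom, dif_neg h]

theorem pvWsim_ge (s : List Int) (q d : Int) :
    ∀ (n : Nat) (f c : Int), (q - c).toNat ≤ n → f ≤ c → c - f ≤ pvWsim s q d f c := by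
  intro n
  induction n with
  | zero =>
    intro f c hn hfc
    rw [pvWsim, dif_neg (by omega : ¬ c < q)]
  | succ n ih =>
    intro f c hn hfc
    by_cases h : c < q
    · rw [pvWsim, dif_pos h]
      by_cases hb : pvAt s c - pvAt s f ≤ d
      · simp only [hb, if_true]
        have := ih f (c + 1) (by omega) (by omega); omega
      · simp only [hb, if_false]
        have := ih (f + 1) (c + 1) (by omega) (by omega); omega
    · rw [pvWsim, dif_neg h]

-- the sweep's final window size equals the best per-start window over [f, q)
theorem pvWsim_eq (s : List Int) (q d : Int) (hm : pvMono s) (hq : q ≤ (s.length : Int)) :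
    ∀ (n : Nat) (f c : Int), (q - c).toNat ≤ n → 0 ≤ f → f ≤ c → c ≤ q →
      pvWsim s q d f c = max (c - f) (pvMfrom s q d f) := by
  intro n
  induction n with
  | zero =>
    intro f c hn h0 hfc hcq
    have hc : ¬ c < q := by omega
    rw [pvWsim, dif_neg hc]
    have h1 := pvMfrom_le s q d hm hq (q - f).toNat f (le_refl _) h0 (by omega)
    have h2 := pvMfrom_nonneg s q d f hm h0 (by omega) hq
    omega
  | succ n ih =>
    intro f c hn h0 hfc hcq
    by_cases h : c < q
    · rw [pvWsim, dif_pos h]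
      have hMf : pvMfrom s q d f = max (pvL s q d f) (pvMfrom s q d (f + 1)) := by
        rw [pvMfrom, dif_pos (by omega : f < q)]
      obtain ⟨b1, b2, b3, b4⟩ := pv_bs_spec s (pvAt s f + d) hm (q - f).toNat f q
        (le_refl _) h0 (by omega) hq
      by_cases hb : pvAt s c - pvAt s f ≤ d
      · simp only [hb, if_true]
        rw [ih f (c + 1) (by omega) h0 (by omega) (by omega)]
        have hL : c + 1 - f ≤ pvL s q d f := by
          unfold pvL
          by_contra hc
          have := b4 c (by omega) h
          omega
        rw [hMf]; omega
      · simp only [hb, if_false]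
        rw [ih (f + 1) (c + 1) (by omega) (by omega) (by omega) (by omega)]
        have hL : pvL s q d f ≤ c - f := by
          unfold pvL
          by_contra hc
          have := b3 c (by omega) (by omega)
          omega
        rw [hMf]; omega
    · rw [pvWsim, dif_neg h]
      have h1 := pvMfrom_le s q d hm hq (q - f).toNat f (le_refl _) h0 (by omega)
      have h2 := pvMfrom_nonneg s q d f hm h0 (by omega) hq
      omega

-- A's loop returns max(days, final window size)
theorem pv_loopA_eq (s : List Int) (q d : Int) (hq : q ≤ (s.length : Int)) :
    ∀ (n : Nat) (f c days : Int), (q - c).toNat ≤ n → 0 ≤ f → f ≤ c → c ≤ q →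
      (c - f ≤ days ∨ c < q) →
      things_to_do_loopA s q d f c days = max days (pvWsim s q d f c) := by
  intro n
  induction n with
  | zero =>
    intro f c days hn h0 hfc hcq hd
    have hc : ¬ c < q := by omega
    rw [things_to_do_loopA, dif_neg hc, pvWsim, dif_neg hc]
    omega
  | succ n ih =>
    intro f c days hn h0 hfc hcq hd
    by_cases h : c < q
    · rw [things_to_do_loopA, dif_pos h, pvWsim, dif_pos h,
        pvAt_pyGet? s c (by omega) (by omega), pvAt_pyGet? s f h0 (by omega)]
      by_cases hb : pvAt s c - pvAt s f ≤ d
      · simp only [hb, if_true]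
        by_cases h2 : c + 1 < q
        · rw [if_neg (by omega), ih f (c + 1) days (by omega) h0 (by omega) (by omega) (Or.inr h2)]
        · have hW : pvWsim s q d f (c + 1) = c + 1 - f := by
            rw [pvWsim, dif_neg (by omega)]
          rw [ih f (c + 1) _ (by omega) h0 (by omega) (by omega)
            (Or.inl (by split_ifs <;> omega)), hW]
          split_ifs <;> omega
      · simp only [hb, if_false]
        have hWge := pvWsim_ge s q d (q - (c + 1)).toNat (f + 1) (c + 1) (le_refl _) (by omega)
        rw [ih (f + 1) (c + 1) _ (by omega) (by omega) (by omega) (by omega)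
          (Or.inl (by split_ifs <;> omega))]
        split_ifs <;> omega
    · rw [things_to_do_loopA, dif_neg h, pvWsim, dif_neg h]
      omega

-- B's fold returns max(days, best per-start window over [i, q))
theorem pv_foldB (s : List Int) (q d : Int) (hm : pvMono s) (hq : q ≤ (s.length : Int)) :
    ∀ (n : Nat) (i days : Int), (q - i).toNat ≤ n → 0 ≤ i → i ≤ q → 0 ≤ days →
      (PySem.List.pyRange i q 1).foldl
        (fun days i =>
          match PySem.List.pyGet? s i with
          | some v =>
              if things_to_do_bsearch s (v + d) i q - i > days
              then things_to_do_bsearch s (v + d) i q - i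
              else days
          | none => days) days = max days (pvMfrom s q d i) := by
  intro n
  induction n with
  | zero =>
    intro i days hn h0 hiq hd
    rw [PySem.List.pyRange_one_eq_nil (by omega), pvMfrom, dif_neg (by omega : ¬ i < q)]
    simp; omega
  | succ n ih =>
    intro i days hn h0 hiq hd
    by_cases h : i < q
    · rw [PySem.List.pyRange_one_cons h, List.foldl_cons, pvAt_pyGet? s i h0 (by omega)]
      simp only []
      have hL := pvL_bounds s q d i hm h0 (by omega) hq
      have hMf : pvMfrom s q d i = max (pvL s q d i) (pvMfrom s q d (i + 1)) := by
        rw [pvMfrom, dif_pos h]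
      have hrw : (if things_to_do_bsearch s (pvAt s i + d) i q - i > days
            then things_to_do_bsearch s (pvAt s i + d) i q - i else days)
          = max days (pvL s q d i) := by
        unfold pvL; split_ifs <;> omega
      rw [hrw, ih (i + 1) _ (by omega) (by omega) (by omega) (by omega)]
      rw [hMf]; omega
    · rw [PySem.List.pyRange_one_eq_nil (by omega), pvMfrom, dif_neg h]
      simp; omega

-- ===== VERDICT (by name: the statement is the Claim_ definition above) =====
theorem things_to_do_spec : Claim_equal_things_to_do := by
  intro q d things _ hpre
  unfold Spec_things_to_do things_to_do things_to_do_alt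
  have hm := pvMono_sorted things
  have hq : q ≤ (((PySem.List.sorted things (fun x => x) false).length : Nat) : Int) := by
    rw [PySem.List.length_sorted]; exact hpre
  by_cases h : 0 < q
  · rw [pv_loopA_eq _ q d hq (q - 0).toNat 0 0 1 (le_refl _) (le_refl _) (le_refl _)
      (by omega) (Or.inr h)]
    rw [pvWsim_eq _ q d hm hq (q - 0).toNat 0 0 (le_refl _) (le_refl _) (le_refl _) (by omega)]
    rw [pv_foldB _ q d hm hq (q - 0).toNat 0 1 (le_refl _) (le_refl _) (by omega) (by omega)]
    have := pvMfrom_nonneg (PySem.List.sorted things (fun x => x) false) q d 0 hm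
      (le_refl _) (by omega) hq
    omega
  · rw [things_to_do_loopA, dif_neg (by omega : ¬ (0:Int) < q),
      PySem.List.pyRange_one_eq_nil (by omega : q ≤ (0:Int))]
    rfl
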